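-- pv_equiv track=rewrite | github.com/sasakitaz/CSBI-calculator | source_code/calculator200.py | dimension
-- ===== SOURCE A (Python) =====
-- def dimension(n0, npls, nmns, j, m):
--     dim = [0]
--     allowl = [0]
--     allowmB = [0]
--     for ll in range(- nmns, npls + 1):
--         for mB in range(- j, j + 1):
--
--             jdim = []
--             for num in range(0, j + 1):
--                 jd = (2 * abs(num) + 1)
--                 jdim.append(jd)
--
--             mminus = []
--             for mm in range(0, abs(mB) + 1):
--                 if mm == 0:
--                     a = 0
--                 else:
--                     a = (2 * (abs(mm) - 1) + 1)
--                 mminus.append(a)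
--
--             if ll + mB == m:
--                 d = (npls + 1 - abs(ll))*(sum(jdim)-sum(mminus))
--                 dim.append(d)
--                 allowl.append(ll)
--                 allowmB.append(mB)
--     dimension = sum(dim)*(n0 + 1)
--     return dimension
-- ===== SOURCE B (Python) =====
-- def dimension(n0, npls, nmns, j, m):
--     # Closed forms: sum(jdim) = (j+1)**2 and sum(mminus) = mB**2; the only mB
--     # matching ll+mB == m is mB = m-ll, admitted iff -j <= m-ll <= j.
--     total = 0
--     for ll in range(-nmns, npls + 1):
--         mB = m - ll
--         if -j <= mB <= j:
--             total += (npls + 1 - abs(ll)) * ((j + 1) ** 2 - mB * mB)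
--     return total * (n0 + 1)
-- ===== Notes on version B (the rewrite author's own statement) =====
-- stated objective: faster
-- what changed: Replaced the nested mB/num/mm loops by the closed forms sum(jdim)=(j+1)^2 and sum(mminus)=mB^2 with mB fixed to m-ll, leaving a single loop over ll.
import Mathlib
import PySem

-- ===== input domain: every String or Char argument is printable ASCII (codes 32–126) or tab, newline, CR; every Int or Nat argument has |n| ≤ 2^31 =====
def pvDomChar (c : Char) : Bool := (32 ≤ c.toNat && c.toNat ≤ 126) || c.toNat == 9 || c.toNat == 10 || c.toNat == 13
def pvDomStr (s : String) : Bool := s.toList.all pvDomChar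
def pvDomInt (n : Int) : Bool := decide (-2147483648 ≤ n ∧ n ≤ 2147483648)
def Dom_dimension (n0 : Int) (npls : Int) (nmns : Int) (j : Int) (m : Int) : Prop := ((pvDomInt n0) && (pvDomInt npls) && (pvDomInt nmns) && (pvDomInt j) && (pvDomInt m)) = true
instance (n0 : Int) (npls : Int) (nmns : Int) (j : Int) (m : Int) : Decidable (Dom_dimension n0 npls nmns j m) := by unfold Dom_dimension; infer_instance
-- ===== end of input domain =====

-- B replaces the two inner quantum-number loops by the closed forms sum(jdim) = (j+1)^2
-- and sum(mminus) = mB^2 with mB fixed to m - ll, leaving a single loop over ll (objective: faster).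

-- ===== PORT A =====
-- the jdim list built for every (ll, mB) pair
def dimAjdim (j : Int) : List Int :=
  (PySem.List.pyRange 0 (j + 1)).foldl (fun l num => l ++ [2 * |num| + 1]) []

-- the mminus list built for every (ll, mB) pair
def dimAmminus (mB : Int) : List Int :=
  (PySem.List.pyRange 0 (|mB| + 1)).foldl
    (fun l mm => l ++ [if mm = 0 then (0 : Int) else 2 * (|mm| - 1) + 1]) []

-- one iteration of A's inner loop body; state = (dim, allowl, allowmB)
def dimAinnerStep (npls j m ll : Int) (acc : List Int × List Int × List Int) (mB : Int) :
    List Int × List Int × List Int :=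
  let jdim := dimAjdim j
  let mminus := dimAmminus mB
  if ll + mB = m then
    (acc.1 ++ [(npls + 1 - |ll|) * (jdim.sum - mminus.sum)], acc.2.1 ++ [ll], acc.2.2 ++ [mB])
  else acc

-- A's inner loop over mB
def dimAinner (npls j m ll : Int) (acc : List Int × List Int × List Int) :
    List Int × List Int × List Int :=
  (PySem.List.pyRange (-j) (j + 1)).foldl (dimAinnerStep npls j m ll) acc

def dimension (n0 : Int) (npls : Int) (nmns : Int) (j : Int) (m : Int) : Int :=
  ((PySem.List.pyRange (-nmns) (npls + 1)).foldl
      (fun acc ll => dimAinner npls j m ll acc) ([0], [0], [0])).1.sum * (n0 + 1)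

-- ===== PORT B =====
def dimBstep (npls j m : Int) (total : Int) (ll : Int) : Int :=
  let mB := m - ll
  if -j ≤ mB ∧ mB ≤ j then total + (npls + 1 - |ll|) * ((j + 1) ^ 2 - mB * mB) else total

def dimension_alt (n0 : Int) (npls : Int) (nmns : Int) (j : Int) (m : Int) : Int :=
  ((PySem.List.pyRange (-nmns) (npls + 1)).foldl (dimBstep npls j m) 0) * (n0 + 1)

-- ===== PRECONDITION & SPEC =====
def Spec_dimension (n0 : Int) (npls : Int) (nmns : Int) (j : Int) (m : Int) (out : Int) : Prop := out = dimension_alt n0 npls nmns j m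
instance (n0 : Int) (npls : Int) (nmns : Int) (j : Int) (m : Int) (out : Int) : Decidable (Spec_dimension n0 npls nmns j m out) := by unfold Spec_dimension; infer_instance

-- ===== CLAIM (what is proved, stated in full; the proofs are below) =====
def Claim_equal_dimension : Prop := ∀ (n0 : Int) (npls : Int) (nmns : Int) (j : Int) (m : Int), Dom_dimension n0 npls nmns j m → Spec_dimension n0 npls nmns j m (dimension n0 npls nmns j m)

-- ===== LEMMAS AND PROOFS =====

-- sum of A's jdim terms over range(0, k) is k^2
theorem jdim_map_sum (k : Nat) :
    ((PySem.List.pyRange 0 (k : Int)).map (fun num => 2 * |num| + 1)).sum = (k : Int) ^ 2 := by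
  induction k with
  | zero => simp [PySem.List.pyRange_one_eq_nil le_rfl]
  | succ k ih =>
      have h : ((k : Nat) : Int) + 1 = ((k + 1 : Nat) : Int) := by push_cast; ring
      rw [← h, PySem.List.pyRange_one_succ_right (by positivity)]
      simp only [List.map_append, List.sum_append, ih, List.map_cons, List.map_nil,
        List.sum_cons, List.sum_nil]
      rw [abs_of_nonneg (by positivity : (0:Int) ≤ (k:Int))]
      ring

theorem dimAjdim_sum (j : Int) (h : 0 ≤ j) : (dimAjdim j).sum = (j + 1) ^ 2 := by
  unfold dimAjdim
  rw [PySem.List.foldl_append_singleton_eq_map, List.nil_append]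
  have hk : ((j + 1).toNat : Int) = j + 1 := Int.toNat_of_nonneg (by omega)
  rw [← hk, jdim_map_sum]

-- sum of A's mminus terms over range(0, k+1) is k^2
theorem mminus_map_sum (k : Nat) :
    ((PySem.List.pyRange 0 ((k : Int) + 1)).map
      (fun mm => if mm = 0 then (0 : Int) else 2 * (|mm| - 1) + 1)).sum = (k : Int) ^ 2 := by
  induction k with
  | zero =>
      simp only [Nat.cast_zero]
      rw [PySem.List.pyRange_one_succ_right le_rfl, PySem.List.pyRange_one_eq_nil le_rfl]
      simp
  | succ k ih =>
      have h : ((k + 1 : Nat) : Int) + 1 = ((k : Int) + 1) + 1 := by push_cast; ring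
      rw [h, PySem.List.pyRange_one_succ_right (by positivity)]
      simp only [List.map_append, List.sum_append, ih, List.map_cons, List.map_nil,
        List.sum_cons, List.sum_nil]
      have hne : (k : Int) + 1 ≠ 0 := by positivity
      rw [if_neg hne, abs_of_nonneg (by positivity : (0:Int) ≤ (k:Int) + 1)]
      push_cast; ring

theorem dimAmminus_sum (mB : Int) : (dimAmminus mB).sum = mB ^ 2 := by
  unfold dimAmminus
  rw [PySem.List.foldl_append_singleton_eq_map, List.nil_append]
  have hk : ((|mB|).toNat : Int) = |mB| := Int.toNat_of_nonneg (abs_nonneg mB)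
  rw [← sq_abs mB, ← hk]
  exact mminus_map_sum _

-- filtering range(a, b) for the single value c
theorem filter_pyRange_singleton (a b c : Int) :
    (PySem.List.pyRange a b).filter (fun x => decide (x = c)) =
      if a ≤ c ∧ c < b then [c] else [] := by
  by_cases hab : b ≤ a
  · rw [PySem.List.pyRange_one_eq_nil hab, if_neg (by omega)]
    rfl
  · have hlen : ∀ n : Nat, ∀ a : Int, (b - a).toNat = n →
        (PySem.List.pyRange a b).filter (fun x => decide (x = c)) =
          if a ≤ c ∧ c < b then [c] else [] := by
      intro n
      induction n with
      | zero => intro a h; rw [PySem.List.pyRange_one_eq_nil (by omega), if_neg (by omega)]; rfl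
      | succ n ih =>
          intro a h
          rw [PySem.List.pyRange_one_cons (by omega), List.filter_cons]
          by_cases hac : a = c
          · subst hac
            simp only [decide_true, if_pos (by omega : a ≤ a ∧ a < b)]
            have : (PySem.List.pyRange (a + 1) b).filter (fun x => decide (x = a)) = [] := by
              rw [ih (a + 1) (by omega), if_neg (by omega)]
            simp [this]
          · simp only [decide_eq_true_eq, if_neg hac]
            rw [ih (a + 1) (by omega)]
            by_cases hc : a ≤ c ∧ c < b
            · rw [if_pos (by omega), if_pos hc]
            · rw [if_neg (by omega), if_neg hc]
    exact hlen (b - a).toNat a rfl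

-- A's inner loop only ever grows the first state component by appends governed by the match test
theorem dimAinner_fst (npls j m ll : Int) (L : List Int) (acc : List Int × List Int × List Int) :
    (L.foldl (dimAinnerStep npls j m ll) acc).1 =
      L.foldl (fun l mB => if decide (ll + mB = m) = true then
        l ++ [(npls + 1 - |ll|) * ((dimAjdim j).sum - (dimAmminus mB).sum)] else l) acc.1 := by
  induction L generalizing acc with
  | nil => rfl
  | cons x t ih =>
      simp only [List.foldl_cons, ih]
      congr 1
      unfold dimAinnerStep
      by_cases h : ll + x = m <;> simp [h]

-- the value A's inner loop adds to sum(dim) for one ll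
theorem dimAinner_fst_sum (npls j m ll : Int) (acc : List Int × List Int × List Int) :
    (dimAinner npls j m ll acc).1.sum =
      acc.1.sum + (if -j ≤ m - ll ∧ m - ll ≤ j then
        (npls + 1 - |ll|) * ((j + 1) ^ 2 - (m - ll) * (m - ll)) else 0) := by
  unfold dimAinner
  rw [dimAinner_fst, PySem.List.foldl_append_if]
  have hfc : (PySem.List.pyRange (-j) (j + 1)).filter (fun mB => decide (ll + mB = m)) =
      (PySem.List.pyRange (-j) (j + 1)).filter (fun x => decide (x = m - ll)) := by
    apply List.filter_congr
    intro x _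
    simp only [decide_eq_decide]
    omega
  rw [hfc, filter_pyRange_singleton]
  by_cases h : -j ≤ m - ll ∧ m - ll < j + 1
  · have hj : 0 ≤ j := by omega
    rw [if_pos h, if_pos (by omega)]
    simp [dimAjdim_sum j hj, dimAmminus_sum, sq]
  · rw [if_neg h, if_neg (by omega)]
    simp

-- the running sum of A's outer loop equals B's fold
theorem outer_sum (npls j m : Int) (L : List Int) (acc : List Int × List Int × List Int) :
    (L.foldl (fun acc ll => dimAinner npls j m ll acc) acc).1.sum =
      L.foldl (dimBstep npls j m) acc.1.sum := by
  induction L generalizing acc with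
  | nil => rfl
  | cons x t ih =>
      simp only [List.foldl_cons]
      rw [ih]
      congr 1
      rw [dimAinner_fst_sum]
      unfold dimBstep
      dsimp only
      split_ifs <;> ring

-- ===== VERDICT (by name: the statement is the Claim_ definition above) =====
theorem dimension_spec : Claim_equal_dimension := by
  intro n0 npls nmns j m _
  unfold Spec_dimension dimension dimension_alt
  rw [outer_sum]
  norm_num
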